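-- pv_equiv track=rewrite | github.com/Doobligation/CodeForce | problem_2060-B.py | calc
-- ===== SOURCE A (Python) =====
-- def calc(t, test_cases):
--     results = []
--
--     for case in test_cases:
--         not_consistent = False
--
--         n, m = case[0][0], case[0][1]
--
--         if m != 1 and n != 1:
--             for x in range(1, n):
--                 for y in range(0, m-1):
--                     minus = case[x][y] - case[x+1][y]
--                     minus2 = (case[x][y+1] - case[x+1][y+1])
--                     if minus != minus2:
--                         not_consistent = True
--                         break
--
--         if not_consistent:
--             results.append([-1])
--             continue
--
--         #Check case[1][x]
--         kongs = []
--
--         for x in range(1, n+1):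
--             kongs.append(case[x][0])
--
--         sorted_index = [index + 1 for index, _ in sorted(enumerate(kongs), key=lambda x: x[1])]
--         results.append(sorted_index)
--
--
--
--
--     return results
-- ===== SOURCE B (Python) =====
-- def calc(t, test_cases):
--     results = []
--     for case in test_cases:
--         n, m = case[0][0], case[0][1]
--         consistent = True
--         if m != 1 and n != 1:
--             # row 1 is the baseline: every later row must be row 1 shifted by a constant
--             consistent = all(
--                 case[x][y] == case[1][y] + (case[x][0] - case[1][0])
--                 for x in range(2, n + 1)
--                 for y in range(m)
--             )
--         if consistent:
--             results.append(sorted(range(1, n + 1), key=lambda i: case[i][0]))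
--         else:
--             results.append([-1])
--     return results
-- ===== Notes on version B (the rewrite author's own statement) =====
-- stated objective: alternative
-- what changed: The pairwise adjacent-row consistency scan (column differences between row x and row x+1) is replaced by a reference-row check (every later row must equal row 1 plus a constant offset), and the 1-based indices are sorted directly by their first-column key instead of enumerating a copied value list and projecting indices out of the sorted pairs.
import Mathlib
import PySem

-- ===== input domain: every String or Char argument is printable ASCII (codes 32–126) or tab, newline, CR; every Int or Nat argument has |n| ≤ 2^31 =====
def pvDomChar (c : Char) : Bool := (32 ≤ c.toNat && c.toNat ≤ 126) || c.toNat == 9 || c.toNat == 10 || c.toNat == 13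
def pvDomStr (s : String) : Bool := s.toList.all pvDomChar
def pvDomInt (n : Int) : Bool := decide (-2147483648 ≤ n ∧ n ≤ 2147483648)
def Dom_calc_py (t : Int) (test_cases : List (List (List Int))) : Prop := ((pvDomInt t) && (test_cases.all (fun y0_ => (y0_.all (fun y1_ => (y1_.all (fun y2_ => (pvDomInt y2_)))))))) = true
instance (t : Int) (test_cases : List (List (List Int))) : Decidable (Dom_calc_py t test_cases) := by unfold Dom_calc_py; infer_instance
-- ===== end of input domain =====

-- B replaces A's adjacent-row pairwise consistency scan by a reference-row check (each later
-- row compared to row 1 plus a constant offset) and sorts the 1-based row indices directly by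
-- their first-column key instead of enumerating and sorting a value list; objective: alternative.


-- ===== PORT A =====
-- cell access case[x][y] (always in range under Pre_)
def pvCell (case : List (List Int)) (x y : Int) : Int :=
  PySem.List.pyGetD (PySem.List.pyGetD case x ([] : List Int)) y 0

-- body of A's "for case in test_cases" loop: the result row appended for one case
def pvCaseA (case : List (List Int)) : List Int :=
  let n := pvCell case 0 0
  let m := pvCell case 0 1
  let not_consistent :=
    if m ≠ 1 ∧ n ≠ 1 then
      (PySem.List.pyRange 1 n 1).foldl (fun nc x =>
        nc || (PySem.List.pyRange 0 (m-1) 1).any (fun y =>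
          let minus := pvCell case x y - pvCell case (x+1) y
          let minus2 := pvCell case x (y+1) - pvCell case (x+1) (y+1)
          decide (minus ≠ minus2))) false
    else false
  if not_consistent then [-1]
  else
    let kongs := (PySem.List.pyRange 1 (n+1) 1).foldl (fun ks x => ks ++ [pvCell case x 0]) []
    (PySem.List.sorted (PySem.List.enumerate kongs 0) (fun p => p.2) false).map (fun p => p.1 + 1)

def calc_py (t : Int) (test_cases : List (List (List Int))) : List (List Int) :=
  test_cases.foldl (fun results case => results ++ [pvCaseA case]) []

-- ===== PORT B =====
-- body of B's loop: row 1 is the baseline; each later row must be row 1 shifted by a constant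
def pvCaseB (case : List (List Int)) : List Int :=
  let n := pvCell case 0 0
  let m := pvCell case 0 1
  let consistent :=
    if m ≠ 1 ∧ n ≠ 1 then
      (PySem.List.pyRange 2 (n+1) 1).all (fun x =>
        (PySem.List.pyRange 0 m 1).all (fun y =>
          pvCell case x y == pvCell case 1 y + (pvCell case x 0 - pvCell case 1 0)))
    else true
  if consistent then
    PySem.List.sorted (PySem.List.pyRange 1 (n+1) 1) (fun i => pvCell case i 0) false
  else [-1]

def calc_py_alt (t : Int) (test_cases : List (List (List Int))) : List (List Int) :=
  test_cases.foldl (fun results case => results ++ [pvCaseB case]) []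

-- ===== PRECONDITION & SPEC =====
-- Pre_ excludes exactly the inputs where Python A raises IndexError: a case with no header row,
-- a header row shorter than 2, fewer than n rows after the header, or a row among rows 1..n that
-- is empty (or shorter than m columns while the consistency scan runs).
def Pre_calc_py (t : Int) (test_cases : List (List (List Int))) : Prop :=
  ∀ case ∈ test_cases,
    case ≠ [] ∧
    2 ≤ (case.getD 0 []).length ∧
    (let n := (case.getD 0 []).getD 0 0
     let m := (case.getD 0 []).getD 1 0
     (0 < n → n < (case.length : Int)) ∧
     ∀ r ∈ (case.drop 1).take n.toNat,
       1 ≤ r.length ∧ (m ≠ 1 → n ≠ 1 → m ≤ (r.length : Int)))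

instance (t : Int) (test_cases : List (List (List Int))) : Decidable (Pre_calc_py t test_cases) := by
  unfold Pre_calc_py; infer_instance

def pvWitness_calc_py : Int × List (List (List Int)) :=
  (1, [[[2, 2], [3, 5], [1, 3]], [[3, 1], [2], [1], [3]]])

def Spec_calc_py (t : Int) (test_cases : List (List (List Int))) (out : List (List Int)) : Prop := out = calc_py_alt t test_cases
instance (t : Int) (test_cases : List (List (List Int))) (out : List (List Int)) : Decidable (Spec_calc_py t test_cases out) := by unfold Spec_calc_py; infer_instance

-- ===== CLAIM (what is proved, stated in full; the proofs are below) =====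
def Claim_equal_calc_py : Prop := ∀ (t : Int) (test_cases : List (List (List Int))), Dom_calc_py t test_cases → Pre_calc_py t test_cases → Spec_calc_py t test_cases (calc_py t test_cases)

-- ===== LEMMAS AND PROOFS =====

-- a Python 'flag = flag or p(x)' loop is 'any'
theorem pv_foldl_or {α : Type} (l : List α) (p : α → Bool) (b : Bool) :
    l.foldl (fun a x => a || p x) b = (b || l.any p) := by
  induction l generalizing b with
  | nil => simp
  | cons x xs ih => simp [List.foldl_cons, ih, Bool.or_assoc]

-- stable insertion respects a relabelling of the elements
theorem pv_insertBy_map {α β : Type} (bf : β → β → Bool) (g : α → β) (x : α) (l : List α) :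
    PySem.List.insertBy bf (g x) (l.map g) =
      (PySem.List.insertBy (fun a b => bf (g a) (g b)) x l).map g := by
  induction l with
  | nil => simp [PySem.List.insertBy]
  | cons y ys ih =>
    simp only [List.map_cons, PySem.List.insertBy]
    split_ifs <;> simp_all

-- the stable sort commutes with mapping, sorting by the composed key
theorem pv_sorted_map {α β κ : Type} [LT κ] [DecidableLT κ]
    (l : List α) (g : α → β) (key : β → κ) :
    PySem.List.sorted (l.map g) key false =
      (PySem.List.sorted l (fun a => key (g a)) false).map g := by
  rw [PySem.List.sorted_eq_foldl_insertBy, PySem.List.sorted_eq_foldl_insertBy]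
  suffices h : ∀ acc : List α,
      (l.map g).foldl (fun acc x => PySem.List.insertBy (fun a b => decide (key a < key b)) x acc) (acc.map g) =
      (l.foldl (fun acc x => PySem.List.insertBy (fun a b => decide (key (g a) < key (g b))) x acc) acc).map g by
    simpa using h []
  induction l with
  | nil => intro acc; simp
  | cons x xs ih =>
    intro acc
    simp only [List.map_cons, List.foldl_cons]
    rw [pv_insertBy_map (fun a b => decide (key a < key b)) g x acc, ih]

theorem pv_enumerate_map {α β : Type} (g : α → β) (l : List α) (s : Int) :
    PySem.List.enumerate (l.map g) s = (PySem.List.enumerate l s).map (fun p => (p.1, g p.2)) := by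
  induction l generalizing s with
  | nil => simp [PySem.List.enumerate_nil]
  | cons x xs ih => simp [PySem.List.enumerate_cons, ih]

theorem pv_enum_range (n : Nat) (s a : Int) :
    PySem.List.enumerate ((List.range n).map (fun k : Nat => a + (k:Int))) s
      = (List.range n).map (fun k : Nat => (s + k, a + (k:Int))) := by
  induction n generalizing s with
  | zero => simp [PySem.List.enumerate_nil]
  | succ n ih =>
    rw [List.range_succ, List.map_append, List.map_append, PySem.List.enumerate_append, ih]
    simp [PySem.List.enumerate_cons, PySem.List.enumerate_nil]

theorem pv_enumerate_pyRange (n : Int) :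
    PySem.List.enumerate (PySem.List.pyRange 1 (n+1) 1) 0
      = (PySem.List.pyRange 1 (n+1) 1).map (fun i => (i - 1, i)) := by
  rw [PySem.List.pyRange_one, pv_enum_range, List.map_map]
  refine List.map_congr_left ?_
  intro k _
  simp [Function.comp]

-- the arithmetic heart: "every adjacent row pair has constant column differences" iff
-- "every row is row 1 plus a constant offset" (both over rows 1..n, columns 0..m-1)
theorem pv_key (g : Int → Int → Int) (n m : Int) :
    (∀ x, 1 ≤ x → x < n → ∀ y, 0 ≤ y → y < m - 1 →
        g x y - g (x+1) y = g x (y+1) - g (x+1) (y+1))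
  ↔ (∀ x, 2 ≤ x → x < n + 1 → ∀ y, 0 ≤ y → y < m →
        g x y = g 1 y + (g x 0 - g 1 0)) := by
  constructor
  · intro P
    have C : ∀ x, 1 ≤ x → x ≤ n → ∀ y, 0 ≤ y → y < m → g x y = g 1 y + (g x 0 - g 1 0) := by
      intro x hx1
      induction x, hx1 using Int.le_induction with
      | base => intro _ y _ _; ring
      | succ x hx ih =>
        intro hxn y hy0 hym
        have hxn' : x ≤ n := by omega
        have T : ∀ y, 0 ≤ y → y < m → g x y - g (x+1) y = g x 0 - g (x+1) 0 := by
          intro y hy0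
          induction y, hy0 using Int.le_induction with
          | base => intro _; ring
          | succ y hy ihy =>
            intro hym
            have h1 := ihy (by omega)
            have h2 := P x (by omega) (by omega) y hy (by omega)
            linarith
        have h3 := T y hy0 hym
        have h4 := ih hxn' y hy0 hym
        have h5 := ih hxn' 0 le_rfl (by omega)
        linarith
    intro x hx2 hxn y hy0 hym
    exact C x (by omega) (by omega) y hy0 hym
  · intro Q
    have C : ∀ x, 1 ≤ x → x ≤ n → ∀ y, 0 ≤ y → y < m → g x y = g 1 y + (g x 0 - g 1 0) := by
      intro x hx1 hxn y hy0 hym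
      rcases eq_or_lt_of_le hx1 with h | h
      · subst h; ring
      · exact Q x (by omega) (by omega) y hy0 hym
    intro x hx1 hxn y hy0 hym
    have a1 := C x hx1 (by omega) y hy0 (by omega)
    have a2 := C x hx1 (by omega) (y+1) (by omega) (by omega)
    have a3 := C (x+1) (by omega) (by omega) y hy0 (by omega)
    have a4 := C (x+1) (by omega) (by omega) (y+1) (by omega) (by omega)
    linarith

-- the two consistency flags are complementary
theorem pv_flag (case : List (List Int)) (n m : Int) :
    ((PySem.List.pyRange 1 n 1).foldl (fun nc x =>
        nc || (PySem.List.pyRange 0 (m-1) 1).any (fun y =>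
          let minus := pvCell case x y - pvCell case (x+1) y
          let minus2 := pvCell case x (y+1) - pvCell case (x+1) (y+1)
          decide (minus ≠ minus2))) false)
    = !((PySem.List.pyRange 2 (n+1) 1).all (fun x =>
        (PySem.List.pyRange 0 m 1).all (fun y =>
          pvCell case x y == pvCell case 1 y + (pvCell case x 0 - pvCell case 1 0)))) := by
  rw [pv_foldl_or]
  simp only [Bool.false_or]
  have h : ((PySem.List.pyRange 1 n 1).any (fun x =>
        (PySem.List.pyRange 0 (m-1) 1).any (fun y =>
          let minus := pvCell case x y - pvCell case (x+1) y
          let minus2 := pvCell case x (y+1) - pvCell case (x+1) (y+1)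
          decide (minus ≠ minus2))) = true)
      ↔ ¬ ((PySem.List.pyRange 2 (n+1) 1).all (fun x =>
        (PySem.List.pyRange 0 m 1).all (fun y =>
          pvCell case x y == pvCell case 1 y + (pvCell case x 0 - pvCell case 1 0))) = true) := by
    simp only [List.any_eq_true, List.all_eq_true, PySem.List.mem_pyRange_one,
      decide_eq_true_eq, beq_iff_eq, ne_eq]
    constructor
    · rintro ⟨x, ⟨hx1, hxn⟩, y, ⟨hy0, hym⟩, hne⟩ hall
      exact hne ((pv_key (pvCell case) n m).mpr
        (fun x hx2 hxn' y hy0' hym' => hall x ⟨hx2, hxn'⟩ y ⟨hy0', hym'⟩) x hx1 hxn y hy0 hym)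
    · intro hnall
      by_contra hno
      push Not at hno
      exact hnall (fun (x : Int) (hx : 2 ≤ x ∧ x < n + 1) (y : Int) (hy : 0 ≤ y ∧ y < m) =>
        (pv_key (pvCell case) n m).mp
          (fun x' hx1 hxn' y' hy0' hym' => hno x' ⟨hx1, hxn'⟩ y' ⟨hy0', hym'⟩)
          x hx.1 hx.2 y hy.1 hy.2)
  cases hall : ((PySem.List.pyRange 2 (n+1) 1).all (fun x =>
        (PySem.List.pyRange 0 m 1).all (fun y =>
          pvCell case x y == pvCell case 1 y + (pvCell case x 0 - pvCell case 1 0)))) with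
  | false => rw [Bool.not_false]; rw [h]; simp [hall]
  | true => rw [Bool.not_true]; exact Bool.eq_false_iff.mpr (fun ha => h.mp ha hall)

theorem pv_sorted_part (case : List (List Int)) (n : Int) :
    ((PySem.List.sorted
        (PySem.List.enumerate
          ((PySem.List.pyRange 1 (n+1) 1).map (fun x => pvCell case x 0)) 0)
        (fun p => p.2) false).map (fun p => p.1 + 1))
    = PySem.List.sorted (PySem.List.pyRange 1 (n+1) 1) (fun i => pvCell case i 0) false := by
  rw [pv_enumerate_map, pv_enumerate_pyRange, List.map_map, pv_sorted_map, List.map_map]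
  have hc : ((fun p : Int × Int => p.1 + 1) ∘ (fun p : Int × Int => (p.1, pvCell case p.2 0)) ∘
      fun i : Int => (i - 1, i)) = id := by
    funext i; simp
  rw [hc, List.map_id]
  rfl

theorem pv_case (case : List (List Int)) : pvCaseA case = pvCaseB case := by
  unfold pvCaseA pvCaseB
  simp only []
  rw [pv_flag case (pvCell case 0 0) (pvCell case 0 1)]
  rw [PySem.List.foldl_append_singleton_eq_map, List.nil_append]
  by_cases hg : pvCell case 0 1 ≠ 1 ∧ pvCell case 0 0 ≠ 1
  · rw [if_pos hg, if_pos hg]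
    cases h : ((PySem.List.pyRange 2 (pvCell case 0 0 + 1) 1).all (fun x =>
        (PySem.List.pyRange 0 (pvCell case 0 1) 1).all (fun y =>
          pvCell case x y == pvCell case 1 y + (pvCell case x 0 - pvCell case 1 0)))) with
    | false => simp
    | true => simp [pv_sorted_part]
  · rw [if_neg hg, if_neg hg]
    simp [pv_sorted_part]

-- ===== VERDICT (by name: the statement is the Claim_ definition above) =====
theorem calc_py_spec : Claim_equal_calc_py := by
  intro t test_cases _ _
  unfold Spec_calc_py calc_py calc_py_alt
  rw [PySem.List.foldl_append_singleton_eq_map, PySem.List.foldl_append_singleton_eq_map]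
  simp only [List.nil_append]
  exact List.map_congr_left (fun c _ => pv_case c)
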